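-- pv_equiv track=rewrite | github.com/Milan-Rosko/proofcase | theories/T003/python/gen.py | _hierarchical_weights
-- ===== SOURCE A (Python) =====
-- from typing import Dict, Iterable, List, Sequence, Tuple
--
-- def _hierarchical_weights(count: int, inner_base: int, outer_base: int, block_size: int) -> List[int]:
--     if block_size <= 0:
--         raise ValueError("block_size must be positive")
--
--     inner_pows: List[int] = [1]
--     for _ in range(1, block_size):
--         inner_pows.append(inner_pows[-1] * inner_base)
--
--     weights: List[int] = []
--     outer_pow = 1
--     for idx in range(count):
--         if idx > 0 and idx % block_size == 0:
--             outer_pow *= outer_base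
--         offset = idx % block_size
--         weights.append(outer_pow * inner_pows[offset])
--     return weights
-- ===== SOURCE B (Python) =====
-- def _hierarchical_weights(count, inner_base, outer_base, block_size):
--     if block_size <= 0:
--         raise ValueError("block_size must be positive")
--     return [outer_base ** (i // block_size) * inner_base ** (i % block_size)
--             for i in range(count)]
-- ===== Notes on version B (the rewrite author's own statement) =====
-- stated objective: simpler
-- what changed: Replaces the precomputed inner-power table and the running outer_pow accumulator with a single stateless comprehension computing each weight in closed form as outer_base**(i//block_size) * inner_base**(i%block_size).
import Mathlib
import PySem

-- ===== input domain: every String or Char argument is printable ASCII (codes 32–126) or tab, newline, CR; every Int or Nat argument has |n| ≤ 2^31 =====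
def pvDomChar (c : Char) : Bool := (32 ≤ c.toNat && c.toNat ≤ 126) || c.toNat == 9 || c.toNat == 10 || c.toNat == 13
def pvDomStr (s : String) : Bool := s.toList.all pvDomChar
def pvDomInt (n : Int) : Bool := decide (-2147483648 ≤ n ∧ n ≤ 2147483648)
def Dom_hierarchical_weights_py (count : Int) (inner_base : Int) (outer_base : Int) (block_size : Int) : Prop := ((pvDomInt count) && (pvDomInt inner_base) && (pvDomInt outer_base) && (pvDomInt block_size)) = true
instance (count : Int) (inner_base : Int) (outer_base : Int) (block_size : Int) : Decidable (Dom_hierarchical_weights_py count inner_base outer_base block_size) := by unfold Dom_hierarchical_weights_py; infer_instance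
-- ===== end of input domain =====

-- B replaces A's inner-power table and running outer_pow accumulator by a stateless
-- closed-form comprehension (simpler); equivalence is proved on block_size > 0 (A raises ValueError otherwise).

-- ===== PORT A =====
-- literal port of A: build inner_pows by appending last*inner_base, then loop idx over
-- range(count) threading (outer_pow, weights).  inner_pows[-1] / inner_pows[offset] are
-- always in range, so pyGetD with default 0 is exact here.
def hierarchical_weights_py (count : Int) (inner_base : Int) (outer_base : Int) (block_size : Int) : List Int :=
  if block_size ≤ 0 then []  -- Python raises ValueError; excluded by Pre_
  else
    let inner_pows : List Int :=
      (PySem.List.pyRange 1 block_size 1).foldl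
        (fun acc _ => acc ++ [PySem.List.pyGetD acc (-1) 0 * inner_base]) [1]
    let st :=
      (PySem.List.pyRange 0 count 1).foldl
        (fun (st : Int × List Int) idx =>
          let outer_pow := if idx > 0 ∧ PySem.Int.mod idx block_size = 0
                           then st.1 * outer_base else st.1
          let offset := PySem.Int.mod idx block_size
          (outer_pow, st.2 ++ [outer_pow * PySem.List.pyGetD inner_pows offset 0]))
        (1, [])
    st.2

-- ===== PORT B =====
def hierarchical_weights_py_alt (count : Int) (inner_base : Int) (outer_base : Int) (block_size : Int) : List Int :=
  if block_size ≤ 0 then []  -- Python raises ValueError; excluded by Pre_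
  else
    (PySem.List.pyRange 0 count 1).map (fun i =>
      outer_base ^ (PySem.Int.floordiv i block_size).toNat *
      inner_base ^ (PySem.Int.mod i block_size).toNat)

-- ===== PRECONDITION & SPEC =====
-- A (and B) raise ValueError exactly when block_size <= 0.
def Pre_hierarchical_weights_py (count : Int) (inner_base : Int) (outer_base : Int) (block_size : Int) : Prop := 0 < block_size
instance (count : Int) (inner_base : Int) (outer_base : Int) (block_size : Int) : Decidable (Pre_hierarchical_weights_py count inner_base outer_base block_size) := by unfold Pre_hierarchical_weights_py; infer_instance
def pvWitness_hierarchical_weights_py : Int × Int × Int × Int := (7, 2, 3, 3)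

def Spec_hierarchical_weights_py (count : Int) (inner_base : Int) (outer_base : Int) (block_size : Int) (out : List Int) : Prop := out = hierarchical_weights_py_alt count inner_base outer_base block_size
instance (count : Int) (inner_base : Int) (outer_base : Int) (block_size : Int) (out : List Int) : Decidable (Spec_hierarchical_weights_py count inner_base outer_base block_size out) := by unfold Spec_hierarchical_weights_py; infer_instance

-- ===== CLAIM (what is proved, stated in full; the proofs are below) =====
def Claim_equal_hierarchical_weights_py : Prop := ∀ (count : Int) (inner_base : Int) (outer_base : Int) (block_size : Int), Dom_hierarchical_weights_py count inner_base outer_base block_size → Pre_hierarchical_weights_py count inner_base outer_base block_size → Spec_hierarchical_weights_py count inner_base outer_base block_size (hierarchical_weights_py count inner_base outer_base block_size)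

-- ===== LEMMAS AND PROOFS =====

-- the inner_pows table is the powers of inner_base
theorem pv_inner_pows (ib : Int) (n : Nat) :
    (PySem.List.pyRange 1 (1 + (n : Int)) 1).foldl
        (fun acc _ => acc ++ [PySem.List.pyGetD acc (-1) 0 * ib]) [1]
      = (List.range (n + 1)).map (fun k => ib ^ k) := by
  induction n with
  | zero => simp
  | succ m ih =>
    have h : (1 : Int) + (m + 1 : Nat) = (1 + (m : Int)) + 1 := by push_cast; ring
    rw [h, PySem.List.pyRange_one_succ_right (by omega), List.foldl_append, ih]
    have hne : (List.range (m + 1)).map (fun k => ib ^ k)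
        = (List.range m).map (fun k => ib ^ k) ++ [ib ^ m] := by
      simp [List.range_succ]
    simp only [List.foldl_cons, List.foldl_nil, hne,
      PySem.List.pyGetD_neg_one_append_singleton]
    rw [List.range_succ, List.range_succ]
    simp [pow_succ]

-- Nat division: step of the quotient when the index advances by one
theorem pv_div_step_mul (bs n : Nat) (hbs : 0 < bs) (hn : 0 < n) (h : n % bs = 0) :
    n / bs = (n - 1) / bs + 1 := by
  obtain ⟨q, hq⟩ : bs ∣ n := Nat.dvd_of_mod_eq_zero h
  have hq0 : q ≠ 0 := by rintro rfl; rw [Nat.mul_zero] at hq; omega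
  obtain ⟨q', rfl⟩ : ∃ q', q = q' + 1 := ⟨q - 1, by omega⟩
  subst hq
  have e1 : bs * (q' + 1) = bs * q' + bs := by ring
  rw [e1, Nat.mul_add_div hbs, Nat.add_sub_assoc hbs, Nat.mul_add_div hbs,
    Nat.div_self hbs, Nat.div_eq_of_lt (show bs - 1 < bs from by omega)]

theorem pv_div_step_same (bs n : Nat) (hbs : 0 < bs) (h : ¬(0 < n ∧ n % bs = 0)) :
    n / bs = (n - 1) / bs := by
  rcases Nat.eq_zero_or_pos n with h0 | hn
  · simp [h0]
  have hr : n % bs ≠ 0 := by tauto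
  have hd := Nat.div_add_mod n bs
  have h1 : n - 1 = bs * (n / bs) + (n % bs - 1) := by omega
  have hlt : n % bs - 1 < bs := by have := Nat.mod_lt n hbs; omega
  conv_rhs => rw [h1]
  rw [Nat.mul_add_div hbs, Nat.div_eq_of_lt hlt]
  omega

-- main loop invariant: after n iterations the state is
-- (outer_base^((n-1)/bs) [with Nat subtraction], B's list for count n)
theorem pv_loop (ib ob : Int) (bs : Nat) (hbs : 0 < bs) (n : Nat) :
    (PySem.List.pyRange 0 (n : Int) 1).foldl
        (fun (st : Int × List Int) idx =>
          let outer_pow := if idx > 0 ∧ PySem.Int.mod idx (bs : Int) = 0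
                           then st.1 * ob else st.1
          let offset := PySem.Int.mod idx (bs : Int)
          (outer_pow, st.2 ++ [outer_pow *
            PySem.List.pyGetD ((List.range bs).map (fun k => ib ^ k)) offset 0]))
        (1, [])
      = (ob ^ ((n - 1) / bs),
         (PySem.List.pyRange 0 (n : Int) 1).map (fun i =>
           ob ^ (PySem.Int.floordiv i (bs : Int)).toNat *
           ib ^ (PySem.Int.mod i (bs : Int)).toNat)) := by
  induction n with
  | zero => simp [PySem.List.pyRange_one_eq_nil (by omega : (0:Int) ≤ 0)]
  | succ m ih =>
    have h : ((m + 1 : Nat) : Int) = (m : Int) + 1 := by push_cast; ring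
    rw [h, PySem.List.pyRange_one_succ_right (by omega), List.foldl_append, List.map_append, ih]
    simp only [List.foldl_cons, List.foldl_nil]
    have hmod : PySem.Int.mod (m : Int) (bs : Int) = ((m % bs : Nat) : Int) :=
      PySem.Int.mod_natCast m bs
    have hdiv : PySem.Int.floordiv (m : Int) (bs : Int) = ((m / bs : Nat) : Int) :=
      PySem.Int.floordiv_natCast m bs
    have hget : PySem.List.pyGetD ((List.range bs).map (fun k => ib ^ k))
        ((m % bs : Nat) : Int) 0 = ib ^ (m % bs) := by
      rw [PySem.List.pyGetD_natCast]
      simp [List.getD, List.getElem?_map, List.getElem?_range (Nat.mod_lt m hbs)]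
    have hcond : ((m : Int) > 0 ∧ PySem.Int.mod (m : Int) (bs : Int) = 0)
        ↔ (0 < m ∧ m % bs = 0) := by
      rw [hmod]; constructor <;> intro ⟨h1, h2⟩ <;> exact ⟨by exact_mod_cast h1, by exact_mod_cast h2⟩
    by_cases hc : 0 < m ∧ m % bs = 0
    · rw [if_pos (hcond.mpr hc)]
      have hq := pv_div_step_mul bs m hbs hc.1 hc.2
      simp only [List.map_cons, List.map_nil, hmod, hdiv, hget, Int.toNat_natCast,
        show m + 1 - 1 = m from rfl, hq, pow_succ]
    · rw [if_neg (fun hh => hc (hcond.mp hh))]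
      have hq := pv_div_step_same bs m hbs hc
      simp only [List.map_cons, List.map_nil, hmod, hdiv, hget, Int.toNat_natCast,
        show m + 1 - 1 = m from rfl, hq]

-- ===== VERDICT (by name: the statement is the Claim_ definition above) =====
theorem hierarchical_weights_py_spec : Claim_equal_hierarchical_weights_py := by
  intro count ib ob bs _hdom hpre
  unfold Spec_hierarchical_weights_py hierarchical_weights_py hierarchical_weights_py_alt
  have hbs : ¬ bs ≤ 0 := by exact not_le.mpr hpre
  rw [if_neg hbs, if_neg hbs]
  -- rewrite block_size and count as Nat casts
  have hbsc : bs = ((bs.toNat : Nat) : Int) := by omega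
  have hbsN : 0 < bs.toNat := by omega
  by_cases hcn : count ≤ 0
  · rw [PySem.List.pyRange_one_eq_nil hcn]; simp
  · have hcp : 0 < count := by omega
    have hcc : count = ((count.toNat : Nat) : Int) := by omega
    rw [hcc, hbsc]
    rw [show ((bs.toNat : Nat) : Int) = 1 + ((bs.toNat - 1 : Nat) : Int) from by omega,
      pv_inner_pows ib (bs.toNat - 1), show bs.toNat - 1 + 1 = bs.toNat from by omega,
      ← show ((bs.toNat : Nat) : Int) = 1 + ((bs.toNat - 1 : Nat) : Int) from by omega]
    simp only [pv_loop ib ob bs.toNat hbsN count.toNat]
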